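-- pv_equiv track=rewrite | github.com/KMORaza/Rosetta-Code-Challenges | Rosetta Code Challenges/ZigZagMatrix.py | generate_zigzag_array
-- ===== SOURCE A (Python) =====
-- def generate_zigzag_array(n):
--     result = [[0] * n for _ in range(n)]
--     i, j = 0, 0
--     num = 0
--     for d in range(n * 2 - 1):
--         if d % 2 == 0:
--             while i >= 0 and j < n:
--                 result[i][j] = num
--                 num += 1
--                 i -= 1
--                 j += 1
--             i += 1
--             if j == n:
--                 i += 1
--                 j -= 1
--         else:
--             while j >= 0 and i < n:
--                 result[i][j] = num
--                 num += 1
--                 i += 1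
--                 j -= 1
--             j += 1
--             if i == n:
--                 j += 1
--                 i -= 1
--     return result
-- ===== SOURCE B (Python) =====
-- def generate_zigzag_array(n):
--     result = [[0] * n for _ in range(n)]
--     num = 0
--     for d in range(2 * n - 1):
--         lo = max(0, d - n + 1)
--         hi = min(d, n - 1)
--         rng = range(lo, hi + 1)
--         for i in (reversed(rng) if d % 2 == 0 else rng):
--             result[i][d - i] = num
--             num += 1
--     return result
-- ===== Notes on version B (the rewrite author's own statement) =====
-- stated objective: simpler
-- what changed: B replaces A's cursor walk with in-loop direction flips and boundary corrections by directly enumerating each anti-diagonal d's index range max(0,d-n+1)..min(d,n-1), descending for even d and ascending for odd d, assigning an incrementing counter.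
import Mathlib
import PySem

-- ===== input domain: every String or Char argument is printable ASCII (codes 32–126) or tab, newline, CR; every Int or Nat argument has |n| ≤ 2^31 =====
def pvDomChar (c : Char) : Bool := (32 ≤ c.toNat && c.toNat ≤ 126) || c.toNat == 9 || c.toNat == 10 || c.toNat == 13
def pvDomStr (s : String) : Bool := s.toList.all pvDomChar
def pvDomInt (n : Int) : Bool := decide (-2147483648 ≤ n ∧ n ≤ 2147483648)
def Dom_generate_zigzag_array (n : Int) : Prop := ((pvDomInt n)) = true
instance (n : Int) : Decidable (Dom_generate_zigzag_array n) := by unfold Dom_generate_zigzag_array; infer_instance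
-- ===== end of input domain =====

-- B replaces A's cursor walk (direction flips + boundary corrections) by direct
-- per-anti-diagonal index enumeration; same values, proved equal for all n.

-- shared assignment primitive: `result[i][j] = v`.  Exact for the two ports:
-- every write both programs perform has 0 ≤ i < n and 0 ≤ j < n (no negative
-- wraparound, no IndexError), where List.set/toNat coincide with Python.
def setM (res : List (List Int)) (i j v : Int) : List (List Int) :=
  res.set i.toNat ((res.getD i.toNat []).set j.toNat v)

-- ===== PORT A =====
-- the even-d inner while loop: `while i >= 0 and j < n: result[i][j]=num; num+=1; i-=1; j+=1`
def evenLoop (n : Int) (res : List (List Int)) (num i j : Int) :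
    List (List Int) × Int × Int × Int :=
  if h : 0 ≤ i ∧ j < n then
    evenLoop n (setM res i j num) (num + 1) (i - 1) (j + 1)
  else (res, num, i, j)
termination_by (i + 1).toNat
decreasing_by omega

-- the odd-d inner while loop: `while j >= 0 and i < n: result[i][j]=num; num+=1; i+=1; j-=1`
def oddLoop (n : Int) (res : List (List Int)) (num i j : Int) :
    List (List Int) × Int × Int × Int :=
  if h : 0 ≤ j ∧ i < n then
    oddLoop n (setM res i j num) (num + 1) (i + 1) (j - 1)
  else (res, num, i, j)
termination_by (j + 1).toNat
decreasing_by omega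

def generate_zigzag_array (n : Int) : List (List Int) :=
  let result := List.replicate n.toNat (List.replicate n.toNat (0 : Int))
  let s := (PySem.List.pyRange 0 (n * 2 - 1) 1).foldl
    (fun (st : List (List Int) × Int × Int × Int) (d : Int) =>
      let (result, i, j, num) := st
      if d % 2 = 0 then
        let (result, num, i, j) := evenLoop n result num i j
        let i := i + 1
        if j = n then (result, i + 1, j - 1, num) else (result, i, j, num)
      else
        let (result, num, i, j) := oddLoop n result num i j
        let j := j + 1
        if i = n then (result, i - 1, j + 1, num) else (result, i, j, num))
    (result, 0, 0, 0)
  s.1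

-- ===== PORT B =====
def generate_zigzag_array_alt (n : Int) : List (List Int) :=
  let result := List.replicate n.toNat (List.replicate n.toNat (0 : Int))
  let s := (PySem.List.pyRange 0 (2 * n - 1) 1).foldl
    (fun (st : List (List Int) × Int) (d : Int) =>
      let lo := max 0 (d - n + 1)
      let hi := min d (n - 1)
      let rng := PySem.List.pyRange lo (hi + 1) 1
      (if d % 2 = 0 then rng.reverse else rng).foldl
        (fun (st : List (List Int) × Int) (i : Int) =>
          (setM st.1 i (d - i) st.2, st.2 + 1)) st)
    (result, 0)
  s.1

-- ===== PRECONDITION & SPEC =====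
def Spec_generate_zigzag_array (n : Int) (out : List (List Int)) : Prop := out = generate_zigzag_array_alt n
instance (n : Int) (out : List (List Int)) : Decidable (Spec_generate_zigzag_array n out) := by unfold Spec_generate_zigzag_array; infer_instance

-- ===== CLAIM (what is proved, stated in full; the proofs are below) =====
def Claim_equal_generate_zigzag_array : Prop := ∀ (n : Int), Dom_generate_zigzag_array n → Spec_generate_zigzag_array n (generate_zigzag_array n)

-- ===== LEMMAS AND PROOFS =====

lemma evenLoop_eq (n d : Int) (k : Nat) :
    ∀ (res : List (List Int)) (num i : Int),
      i = max 0 (d - n + 1) + k → i ≤ n - 1 →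
      evenLoop n res num i (d - i) =
        ((((PySem.List.pyRange (max 0 (d - n + 1)) (i + 1) 1).reverse).foldl
            (fun (st : List (List Int) × Int) (x : Int) =>
              (setM st.1 x (d - x) st.2, st.2 + 1)) (res, num)).1,
         (((PySem.List.pyRange (max 0 (d - n + 1)) (i + 1) 1).reverse).foldl
            (fun (st : List (List Int) × Int) (x : Int) =>
              (setM st.1 x (d - x) st.2, st.2 + 1)) (res, num)).2,
         max (-1) (d - n), d - max (-1) (d - n)) := by
  induction k with
  | zero =>
    intro res num i hi hle
    rw [evenLoop]
    rw [dif_pos (by omega)]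
    rw [evenLoop]
    rw [dif_neg (by omega)]
    have hr : PySem.List.pyRange (max 0 (d - n + 1)) (i + 1) 1 = [i] := by
      rw [hi]; simp
    rw [hr]
    simp only [List.reverse_cons, List.reverse_nil, List.nil_append, List.foldl_cons,
      List.foldl_nil, Prod.mk.injEq]
    exact ⟨trivial, trivial, by omega, by omega⟩
  | succ k ih =>
    intro res num i hi hle
    rw [evenLoop]
    rw [dif_pos (by omega)]
    have h1 : d - i + 1 = d - (i - 1) := by omega
    rw [h1, ih (setM res i (d - i) num) (num + 1) (i - 1) (by omega) (by omega)]
    have hr : PySem.List.pyRange (max 0 (d - n + 1)) (i + 1) 1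
        = PySem.List.pyRange (max 0 (d - n + 1)) i 1 ++ [i] := by
      have := PySem.List.pyRange_one_succ_right (a := max 0 (d - n + 1)) (b := i) (by omega)
      simpa using this
    rw [hr]
    simp only [List.reverse_append, List.reverse_cons, List.reverse_nil, List.nil_append,
      List.cons_append, List.foldl_cons]
    have h2 : i - 1 + 1 = i := by omega
    rw [h2]

lemma oddLoop_eq (n d : Int) (k : Nat) :
    ∀ (res : List (List Int)) (num i : Int),
      i = min d (n - 1) - k → 0 ≤ i →
      oddLoop n res num i (d - i) =
        (((PySem.List.pyRange i (min d (n - 1) + 1) 1).foldl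
            (fun (st : List (List Int) × Int) (x : Int) =>
              (setM st.1 x (d - x) st.2, st.2 + 1)) (res, num)).1,
         ((PySem.List.pyRange i (min d (n - 1) + 1) 1).foldl
            (fun (st : List (List Int) × Int) (x : Int) =>
              (setM st.1 x (d - x) st.2, st.2 + 1)) (res, num)).2,
         min n (d + 1), d - min n (d + 1)) := by
  induction k with
  | zero =>
    intro res num i hi h0
    rw [oddLoop]
    rw [dif_pos (by omega)]
    rw [oddLoop]
    rw [dif_neg (by omega)]
    have hr : PySem.List.pyRange i (min d (n - 1) + 1) 1 = [i] := by
      rw [hi]; simp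
    rw [hr]
    simp only [List.foldl_cons, List.foldl_nil, Prod.mk.injEq]
    exact ⟨trivial, trivial, by omega, by omega⟩
  | succ k ih =>
    intro res num i hi h0
    rw [oddLoop]
    rw [dif_pos (by omega)]
    have h1 : d - i - 1 = d - (i + 1) := by omega
    rw [h1, ih (setM res i (d - i) num) (num + 1) (i + 1) (by omega) (by omega)]
    rw [PySem.List.pyRange_one_cons (by omega : i < min d (n - 1) + 1)]
    simp only [List.foldl_cons]

lemma oddLoop_eq' (n d : Int) (k : Nat) (res : List (List Int)) (num j : Int)
    (hk : d - j = min d (n - 1) - k) (h0 : 0 ≤ d - j) :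
    oddLoop n res num (d - j) j =
      (((PySem.List.pyRange (d - j) (min d (n - 1) + 1) 1).foldl
          (fun (st : List (List Int) × Int) (x : Int) =>
            (setM st.1 x (d - x) st.2, st.2 + 1)) (res, num)).1,
       ((PySem.List.pyRange (d - j) (min d (n - 1) + 1) 1).foldl
          (fun (st : List (List Int) × Int) (x : Int) =>
            (setM st.1 x (d - x) st.2, st.2 + 1)) (res, num)).2,
       min n (d + 1), d - min n (d + 1)) := by
  have h := oddLoop_eq n d k res num (d - j) hk h0
  rw [show d - (d - j) = j from by omega] at h
  exact h

lemma outer_eq (n : Int) (hn : 1 ≤ n) (k : Nat) :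
    ∀ (d : Int) (res : List (List Int)) (num : Int),
      d = 2 * n - 1 - k → 0 ≤ d →
      ((PySem.List.pyRange d (n * 2 - 1) 1).foldl
        (fun (st : List (List Int) × Int × Int × Int) (d : Int) =>
          let (result, i, j, num) := st
          if d % 2 = 0 then
            let (result, num, i, j) := evenLoop n result num i j
            let i := i + 1
            if j = n then (result, i + 1, j - 1, num) else (result, i, j, num)
          else
            let (result, num, i, j) := oddLoop n result num i j
            let j := j + 1
            if i = n then (result, i - 1, j + 1, num) else (result, i, j, num))
        (res,
         (if d % 2 = 0 then min d (n - 1) else d - min d (n - 1)),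
         (if d % 2 = 0 then d - min d (n - 1) else min d (n - 1)),
         num)).1
      = ((PySem.List.pyRange d (2 * n - 1) 1).foldl
          (fun (st : List (List Int) × Int) (d : Int) =>
            let lo := max 0 (d - n + 1)
            let hi := min d (n - 1)
            let rng := PySem.List.pyRange lo (hi + 1) 1
            (if d % 2 = 0 then rng.reverse else rng).foldl
              (fun (st : List (List Int) × Int) (i : Int) =>
                (setM st.1 i (d - i) st.2, st.2 + 1)) st)
          (res, num)).1 := by
  induction k with
  | zero =>
    intro d res num hd h0
    rw [PySem.List.pyRange_one_eq_nil (by omega), PySem.List.pyRange_one_eq_nil (by omega)]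
    rfl
  | succ k ih =>
    intro d res num hd h0
    rw [PySem.List.pyRange_one_cons (by omega : d < n * 2 - 1),
        PySem.List.pyRange_one_cons (by omega : d < 2 * n - 1)]
    simp only [List.foldl_cons]
    rcases Int.emod_two_eq d with he | ho
    · -- even diagonal
      simp only [he, reduceIte]
      rw [evenLoop_eq n d (min d (n - 1) - max 0 (d - n + 1)).toNat res num (min d (n - 1))
        (by omega) (by omega)]
      have key := ih (d + 1)
        (((PySem.List.pyRange (max 0 (d - n + 1)) (min d (n - 1) + 1) 1).reverse).foldl
          (fun (st : List (List Int) × Int) (x : Int) =>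
            (setM st.1 x (d - x) st.2, st.2 + 1)) (res, num)).1
        (((PySem.List.pyRange (max 0 (d - n + 1)) (min d (n - 1) + 1) 1).reverse).foldl
          (fun (st : List (List Int) × Int) (x : Int) =>
            (setM st.1 x (d - x) st.2, st.2 + 1)) (res, num)).2
        (by omega) (by omega)
      rw [Prod.mk.eta] at key
      by_cases hjn : d - max (-1) (d - n) = n
      · simp only [hjn, reduceIte]
        rw [show (if (d + 1) % 2 = 0 then min (d + 1) (n - 1) else d + 1 - min (d + 1) (n - 1))
              = max (-1) (d - n) + 1 + 1 from by rw [if_neg (by omega)]; omega,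
            show (if (d + 1) % 2 = 0 then d + 1 - min (d + 1) (n - 1) else min (d + 1) (n - 1))
              = n - 1 from by rw [if_neg (by omega)]; omega] at key
        exact key
      · simp only [hjn, reduceIte]
        rw [show (if (d + 1) % 2 = 0 then min (d + 1) (n - 1) else d + 1 - min (d + 1) (n - 1))
              = max (-1) (d - n) + 1 from by rw [if_neg (by omega)]; omega,
            show (if (d + 1) % 2 = 0 then d + 1 - min (d + 1) (n - 1) else min (d + 1) (n - 1))
              = d - max (-1) (d - n) from by rw [if_neg (by omega)]; omega] at key
        exact key
    · -- odd diagonal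
      simp only [ho, if_neg (show ¬((1:Int) = 0) from by norm_num)]
      rw [oddLoop_eq' n d (2 * min d (n - 1) - d).toNat res num (min d (n - 1))
        (by omega) (by omega)]
      rw [show d - min d (n - 1) = max 0 (d - n + 1) from by omega]
      have key := ih (d + 1)
        ((PySem.List.pyRange (max 0 (d - n + 1)) (min d (n - 1) + 1) 1).foldl
          (fun (st : List (List Int) × Int) (x : Int) =>
            (setM st.1 x (d - x) st.2, st.2 + 1)) (res, num)).1
        ((PySem.List.pyRange (max 0 (d - n + 1)) (min d (n - 1) + 1) 1).foldl
          (fun (st : List (List Int) × Int) (x : Int) =>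
            (setM st.1 x (d - x) st.2, st.2 + 1)) (res, num)).2
        (by omega) (by omega)
      rw [Prod.mk.eta] at key
      by_cases hin : min n (d + 1) = n
      · simp only [hin, reduceIte]
        rw [show (if (d + 1) % 2 = 0 then min (d + 1) (n - 1) else d + 1 - min (d + 1) (n - 1))
              = n - 1 from by rw [if_pos (by omega)]; omega,
            show (if (d + 1) % 2 = 0 then d + 1 - min (d + 1) (n - 1) else min (d + 1) (n - 1))
              = d - n + 1 + 1 from by rw [if_pos (by omega)]; omega] at key
        exact key
      · simp only [hin, reduceIte]
        rw [show (if (d + 1) % 2 = 0 then min (d + 1) (n - 1) else d + 1 - min (d + 1) (n - 1))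
              = min n (d + 1) from by rw [if_pos (by omega)]; omega,
            show (if (d + 1) % 2 = 0 then d + 1 - min (d + 1) (n - 1) else min (d + 1) (n - 1))
              = d - min n (d + 1) + 1 from by rw [if_pos (by omega)]; omega] at key
        exact key

-- A = B for every n: the cursor walk and the per-diagonal enumeration coincide.
lemma ports_agree : ∀ (n : Int), generate_zigzag_array n = generate_zigzag_array_alt n := by
  intro n
  simp only [generate_zigzag_array, generate_zigzag_array_alt]
  by_cases hn : 1 ≤ n
  · have h := outer_eq n hn (2 * n - 1).toNat 0
      (List.replicate n.toNat (List.replicate n.toNat (0 : Int))) 0 (by omega) (by omega)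
    rw [show (if (0 : Int) % 2 = 0 then min 0 (n - 1) else 0 - min 0 (n - 1)) = 0 from
          by rw [if_pos (by norm_num)]; omega,
        show (if (0 : Int) % 2 = 0 then 0 - min 0 (n - 1) else min 0 (n - 1)) = 0 from
          by rw [if_pos (by norm_num)]; omega] at h
    exact h
  · rw [PySem.List.pyRange_one_eq_nil (by omega), PySem.List.pyRange_one_eq_nil (by omega)]
    rfl

-- ===== VERDICT (by name: the statement is the Claim_ definition above) =====
theorem generate_zigzag_array_spec : Claim_equal_generate_zigzag_array := by
  intro n _
  exact ports_agree n
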